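-- pv_equiv track=rewrite | github.com/SRI-CSL/coproof | src/notebooks/220615_lemmas/220707_lemma_retrieval_exps.py | make_statestr
-- ===== SOURCE A (Python) =====
-- def make_statestr(state, consequents_only=False):
--     """ Given lemma state, converts into query string usable for theory bank"""
--     collecting = not(consequents_only)
--     toks = []
--     for tok in state:
--         if tok == "consequents":
--             collecting = True
--         elif collecting:
--             toks.append(str(tok))
--     return " ".join(toks)
-- ===== SOURCE B (Python) =====
-- def make_statestr(state, consequents_only=False):
--     """ Given lemma state, converts into query string usable for theory bank"""
--     toks = list(state)
--     if consequents_only: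
--         try:
--             toks = toks[toks.index("consequents") + 1:]
--         except ValueError:
--             return ""
--     return " ".join(str(t) for t in toks if t != "consequents")
-- ===== Notes on version B (the rewrite author's own statement) =====
-- stated objective: idiomatic
-- what changed: Replaces the running 'collecting' flag with an explicit index search for the first 'consequents', a slice, and a filtering join.
import Mathlib
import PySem

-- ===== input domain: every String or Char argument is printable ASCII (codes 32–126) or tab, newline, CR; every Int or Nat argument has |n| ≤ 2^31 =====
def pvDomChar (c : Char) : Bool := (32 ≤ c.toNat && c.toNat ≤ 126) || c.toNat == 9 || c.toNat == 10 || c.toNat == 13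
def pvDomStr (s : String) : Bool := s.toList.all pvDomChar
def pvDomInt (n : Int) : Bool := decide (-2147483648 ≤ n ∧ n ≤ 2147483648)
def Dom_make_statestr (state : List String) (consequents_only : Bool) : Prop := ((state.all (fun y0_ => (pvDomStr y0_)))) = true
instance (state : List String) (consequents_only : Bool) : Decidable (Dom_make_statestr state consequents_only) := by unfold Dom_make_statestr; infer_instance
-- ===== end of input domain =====

-- B replaces A's running 'collecting' flag with an explicit search for the first
-- "consequents", a slice, and a filtering join (idiomatic decomposition; same cost).

-- ===== PORT A =====
-- the loop body of A ('if tok == "consequents": collecting = True / elif collecting: toks.append(str(tok))')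
def pvAStep (p : Bool × List String) (tok : String) : Bool × List String :=
  if tok == "consequents" then (true, p.2)
  else if p.1 then (p.1, p.2 ++ [tok]) else p

def make_statestr (state : List String) (consequents_only : Bool) : String :=
  let r := state.foldl pvAStep (!consequents_only, [])
  PySem.Str.join " " r.2

-- ===== PORT B =====
def make_statestr_alt (state : List String) (consequents_only : Bool) : String :=
  let toks := state
  if consequents_only then
    match PySem.List.index? toks "consequents" with
    | none => ""
    | some i =>
      PySem.Str.join " "
        ((PySem.List.slice toks (some ((i : Int) + 1)) none).filter (fun t => !(t == "consequents")))
  else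
    PySem.Str.join " " (toks.filter (fun t => !(t == "consequents")))

-- ===== PRECONDITION & SPEC =====
def Spec_make_statestr (state : List String) (consequents_only : Bool) (out : String) : Prop := out = make_statestr_alt state consequents_only
instance (state : List String) (consequents_only : Bool) (out : String) : Decidable (Spec_make_statestr state consequents_only out) := by unfold Spec_make_statestr; infer_instance

-- ===== CLAIM (what is proved, stated in full; the proofs are below) =====
def Claim_equal_make_statestr : Prop := ∀ (state : List String) (consequents_only : Bool), Dom_make_statestr state consequents_only → Spec_make_statestr state consequents_only (make_statestr state consequents_only)

-- ===== LEMMAS AND PROOFS =====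

-- once collecting is true, A's loop appends exactly the non-"consequents" tokens
theorem pvA_loop_true (l : List String) (acc : List String) :
    l.foldl pvAStep (true, acc) = (true, acc ++ l.filter (fun t => !(t == "consequents"))) := by
  induction l generalizing acc with
  | nil => simp
  | cons x xs ih =>
    by_cases hx : x = "consequents" <;>
      simp [pvAStep, hx, ih, List.append_assoc]

-- while collecting is false, A's loop scans for the first "consequents" and then filters the rest
theorem pvA_loop_false (l : List String) (acc : List String) :
    l.foldl pvAStep (false, acc) =
      match PySem.List.index? l "consequents" with
      | none => (false, acc)
      | some i => (true, acc ++ (l.drop (i + 1)).filter (fun t => !(t == "consequents"))) := by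
  induction l generalizing acc with
  | nil => simp [PySem.List.index?]
  | cons x xs ih =>
    by_cases hx : x = "consequents"
    · subst hx
      rw [PySem.List.index?_cons_self]
      simp [pvAStep, pvA_loop_true]
    · rw [PySem.List.index?_cons_of_ne xs hx]
      simp only [List.foldl_cons, pvAStep, beq_iff_eq, hx, if_false, Bool.false_eq_true]
      rw [ih]
      cases h : PySem.List.index? xs "consequents" <;> simp

theorem make_statestr_spec' (state : List String) (consequents_only : Bool) :
    make_statestr state consequents_only = make_statestr_alt state consequents_only := by
  cases consequents_only with
  | false =>
    simp [make_statestr, make_statestr_alt, pvA_loop_true]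
  | true =>
    simp only [make_statestr, make_statestr_alt, Bool.not_true, if_true]
    rw [pvA_loop_false]
    cases h : PySem.List.index? state "consequents" with
    | none => simp [PySem.Str.join]
    | some i =>
      have : PySem.List.slice state (some ((i : Int) + 1)) none = state.drop (i + 1) := by
        have := PySem.List.slice_from_natCast state (i + 1)
        simpa using this
      simp [this]

-- ===== VERDICT (by name: the statement is the Claim_ definition above) =====
theorem make_statestr_spec : Claim_equal_make_statestr := by
  intro state consequents_only _
  exact make_statestr_spec' state consequents_only
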